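-- pv_equiv track=rewrite | github.com/kiyoja07/DataScience | others/find_min_ordered_work_time.py | make_work_matrix_from_works
-- ===== SOURCE A (Python) =====
-- processor = 4
--
-- def last_work_for_complted_matrix(index, _matrix,  _list):
--
--     """짝수 리스트는 그대로 추가, 홀수 리스트는 역순해서 추가"""
--
--     if (index // processor) % 2 == 0:
--
--         return _matrix.append(_list)
--     else:
--         _list = sorted(_list, reverse=True)
--
--         return _matrix.append(_list)
--
-- def make_work_matrix_from_works(works):
--
--     work_matrix = []
--     work_list = []
--
--     for i, work in enumerate(works):
--
--         if i < len(works) - 1: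
--
--             if i % processor == processor - 1:
--                 work_list.append(work)
--                 last_work_for_complted_matrix(i, work_matrix, work_list)
--                 work_list = []
--
--             else:
--                 work_list.append(work)
--
--         else:
--             work_list.append(work)
--             last_work_for_complted_matrix(i, work_matrix, work_list)
--
--     return work_matrix
-- ===== SOURCE B (Python) =====
-- def make_work_matrix_from_works(works):
--     matrix = []
--     for start in range(0, len(works), 4):
--         chunk = works[start:start+4]
--         if (start // 4) % 2 == 1:
--             chunk = sorted(chunk, reverse=True)
--         matrix.append(chunk)
--     return matrix
-- ===== Notes on version B (the rewrite author's own statement) =====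
-- stated objective: simpler
-- what changed: Replaces A's element-by-element loop with a buffer, a boundary/last-element flush case analysis and a helper by a single loop over chunk start positions that slices works[start:start+4] and sorts the slice descending when the chunk index is odd.
import Mathlib
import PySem

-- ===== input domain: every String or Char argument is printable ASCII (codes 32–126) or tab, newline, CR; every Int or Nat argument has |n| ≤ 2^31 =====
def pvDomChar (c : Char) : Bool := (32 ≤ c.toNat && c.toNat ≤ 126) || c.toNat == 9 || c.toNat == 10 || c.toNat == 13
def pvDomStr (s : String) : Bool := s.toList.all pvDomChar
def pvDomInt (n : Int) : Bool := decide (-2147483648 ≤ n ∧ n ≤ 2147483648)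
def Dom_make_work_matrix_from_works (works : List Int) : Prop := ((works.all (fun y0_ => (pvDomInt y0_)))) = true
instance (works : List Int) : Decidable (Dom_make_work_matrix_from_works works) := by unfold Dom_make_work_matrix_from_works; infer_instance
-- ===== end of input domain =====

-- B replaces A's element-by-element buffered loop (with its flush-on-boundary / flush-on-last-element
-- cases and helper) by one loop over chunk start positions with slicing; same return value, simpler code.

-- ===== PORT A =====
def processor : Int := 4

def last_work_for_complted_matrix (index : Int) (matrix : List (List Int)) (l : List Int) : List (List Int) :=
  if PySem.Int.mod (PySem.Int.floordiv index processor) 2 = 0 then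
    matrix ++ [l]
  else
    matrix ++ [PySem.List.sorted l (fun x => x) true]

-- loop body of A's 'for i, work in enumerate(works)' (n = len(works))
def pvStepA (n : Int) (st : List (List Int) × List Int) (p : Int × Int) : List (List Int) × List Int :=
  let i := p.1
  let work := p.2
  if i < n - 1 then
    if PySem.Int.mod i processor = processor - 1 then
      (last_work_for_complted_matrix i st.1 (st.2 ++ [work]), ([] : List Int))
    else
      (st.1, st.2 ++ [work])
  else
    (last_work_for_complted_matrix i st.1 (st.2 ++ [work]), st.2 ++ [work])

def make_work_matrix_from_works (works : List Int) : List (List Int) :=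
  ((PySem.List.enumerate works 0).foldl (pvStepA (works.length : Int)) ([], [])).1

-- ===== PORT B =====
def make_work_matrix_from_works_alt (works : List Int) : List (List Int) :=
  (PySem.List.pyRange 0 (works.length : Int) 4).foldl
    (fun matrix start =>
      let chunk := PySem.List.slice works (some start) (some (start + 4))
      let chunk := if PySem.Int.mod (PySem.Int.floordiv start 4) 2 = 1
                   then PySem.List.sorted chunk (fun x => x) true else chunk
      matrix ++ [chunk]) []

-- ===== PRECONDITION & SPEC =====
def Spec_make_work_matrix_from_works (works : List Int) (out : List (List Int)) : Prop := out = make_work_matrix_from_works_alt works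
instance (works : List Int) (out : List (List Int)) : Decidable (Spec_make_work_matrix_from_works works out) := by unfold Spec_make_work_matrix_from_works; infer_instance

-- ===== CLAIM (what is proved, stated in full; the proofs are below) =====
def Claim_equal_make_work_matrix_from_works : Prop := ∀ (works : List Int), Dom_make_work_matrix_from_works works → Spec_make_work_matrix_from_works works (make_work_matrix_from_works works)

-- ===== LEMMAS AND PROOFS =====

-- reference: process chunk k (identity for even k, descending sort for odd k)
def pvProc (k : Nat) (l : List Int) : List Int :=
  if k % 2 = 0 then l else PySem.List.sorted l (fun x => x) true

-- reference chunker: both ports are shown equal to pvRef 0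
def pvRef (k : Nat) : List Int → List (List Int)
  | [] => []
  | x :: xs => pvProc k (List.take 4 (x :: xs)) :: pvRef (k + 1) (List.drop 4 (x :: xs))
termination_by l => l.length
decreasing_by simp

lemma pvRef_nil (k : Nat) : pvRef k [] = [] := by rw [pvRef]

lemma pvRef_cons (k : Nat) (l : List Int) (h : l ≠ []) :
    pvRef k l = pvProc k (l.take 4) :: pvRef (k + 1) (l.drop 4) := by
  cases l with
  | nil => exact absurd rfl h
  | cons x xs => rw [pvRef]

lemma pv_mod_cast (i : Nat) : PySem.Int.mod (i : Int) 4 = ((i % 4 : Nat) : Int) := by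
  exact_mod_cast PySem.Int.mod_natCast i 4

lemma pv_div_cast (i : Nat) : PySem.Int.floordiv (i : Int) 4 = ((i / 4 : Nat) : Int) := by
  exact_mod_cast PySem.Int.floordiv_natCast i 4

lemma pv_mod2_cast (k : Nat) : PySem.Int.mod (k : Int) 2 = ((k % 2 : Nat) : Int) := by
  exact_mod_cast PySem.Int.mod_natCast k 2

lemma pv_lastWork_eq (i : Nat) (mat : List (List Int)) (l : List Int) :
    last_work_for_complted_matrix (i : Int) mat l = mat ++ [pvProc (i / 4) l] := by
  unfold last_work_for_complted_matrix pvProc processor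
  rw [pv_div_cast, pv_mod2_cast]
  rcases Nat.mod_two_eq_zero_or_one (i / 4) with h | h <;> simp [h]

lemma pvA_loop (n : Nat) (xs : List Int) : ∀ (i : Nat) (mat : List (List Int)) (buf : List Int),
    xs ≠ [] → i + xs.length = n → buf.length = i % 4 →
    ((PySem.List.enumerate xs (i : Int)).foldl (pvStepA (n : Int)) (mat, buf)).1
      = mat ++ pvRef (i / 4) (buf ++ xs) := by
  induction xs with
  | nil => intro i mat buf h; exact absurd rfl h
  | cons x xs ih =>
    intro i mat buf _ hn hbuf
    rw [PySem.List.enumerate_cons]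
    simp only [List.foldl_cons]
    have hmodlt : i % 4 < 4 := Nat.mod_lt _ (by omega)
    by_cases hxs : xs = []
    · -- last element: flush branch
      subst hxs
      have hn' : i + 1 = n := by simpa using hn
      have hcond : ¬ ((i : Int) < (n : Int) - 1) := by omega
      simp only [pvStepA, hcond, if_false, PySem.List.enumerate_nil, List.foldl_nil]
      rw [pv_lastWork_eq]
      rw [pvRef_cons _ _ (by simp)]
      have hlen : (buf ++ [x]).length ≤ 4 := by simp [hbuf]; omega
      rw [List.take_of_length_le (by simpa using hlen), List.drop_eq_nil_of_le (by simpa using hlen)]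
      simp [pvRef_nil]
    · have hlen : 1 ≤ xs.length := by cases xs with | nil => exact absurd rfl hxs | cons _ _ => simp
      have hn' : i + xs.length + 1 = n := by simpa using hn
      have hcond : ((i : Int) < (n : Int) - 1) := by omega
      by_cases hm : i % 4 = 3
      · have hmI : PySem.Int.mod (i : Int) processor = processor - 1 := by
          unfold processor; rw [pv_mod_cast, hm]; rfl
        simp only [pvStepA, hcond, if_true, hmI, if_true]
        have h1 : ((i : Int) + 1) = ((i + 1 : Nat) : Int) := by push_cast; ring
        rw [h1, ih (i + 1) _ [] hxs (by omega) (by simp; omega)]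
        rw [pv_lastWork_eq]
        rw [pvRef_cons (i / 4) (buf ++ x :: xs) (by simp)]
        have hbx : (buf ++ [x]).length = 4 := by simp [hbuf, hm]
        have htake : (buf ++ x :: xs).take 4 = buf ++ [x] := by
          have : buf ++ x :: xs = (buf ++ [x]) ++ xs := by simp
          rw [this, List.take_append_of_le_length (by omega)]
          rw [List.take_of_length_le (by omega)]
        have hdrop : (buf ++ x :: xs).drop 4 = xs := by
          have : buf ++ x :: xs = (buf ++ [x]) ++ xs := by simp
          rw [this, ← hbx, List.drop_left]
        rw [htake, hdrop]
        have hdiv : (i + 1) / 4 = i / 4 + 1 := by omega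
        simp [hdiv]
      · have hmI : ¬ (PySem.Int.mod (i : Int) processor = processor - 1) := by
          unfold processor; rw [pv_mod_cast]
          intro h; apply hm; omega
        simp only [pvStepA, hcond, if_true, hmI, if_false]
        have h1 : ((i : Int) + 1) = ((i + 1 : Nat) : Int) := by push_cast; ring
        rw [h1, ih (i + 1) mat (buf ++ [x]) hxs (by omega) (by simp [hbuf]; omega)]
        have hdiv : (i + 1) / 4 = i / 4 := by omega
        simp [hdiv]

lemma pvA_eq_ref (works : List Int) :
    make_work_matrix_from_works works = pvRef 0 works := by
  cases works with
  | nil => simp [make_work_matrix_from_works, PySem.List.enumerate_nil, pvRef_nil]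
  | cons x xs =>
    unfold make_work_matrix_from_works
    have := pvA_loop (x :: xs).length (x :: xs) 0 [] [] (by simp) (by simp) (by simp)
    simpa using this

-- B as a map over chunk indices, then equal to pvRef
lemma pvB_map_eq_ref (xs : List Int) : ∀ (k0 : Nat),
    (List.range ((xs.length + 3) / 4)).map
      (fun j => pvProc (k0 + j) ((xs.drop (4 * j)).take 4)) = pvRef k0 xs := by
  induction hlen : xs.length using Nat.strong_induction_on generalizing xs with
  | _ L ih =>
  intro k0
  cases xs with
  | nil => subst hlen; simp [pvRef_nil]
  | cons x xs =>
    subst hlen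
    have hL : ((x :: xs).length + 3) / 4 = (((x :: xs).drop 4).length + 3) / 4 + 1 := by
      simp; omega
    rw [hL, List.range_succ_eq_map, List.map_cons, List.map_map]
    rw [pvRef_cons _ _ (by simp)]
    refine congrArg₂ List.cons ?_ ?_
    · simp
    · have ihtail := ih ((xs.drop 3).length) (by simp) (xs.drop 3) rfl (k0 + 1)
      rw [show (List.drop 4 (x :: xs)) = xs.drop 3 from rfl, ← ihtail]
      apply List.map_congr_left
      intro j _
      have hdrop : List.drop (4 * (j + 1)) (x :: xs) = List.drop (4 * j) (xs.drop 3) := by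
        rw [List.drop_drop, show 4 * (j + 1) = (4 * j + 3) + 1 by ring, List.drop_succ_cons]
        congr 1
        omega
      simp only [Function.comp, Nat.succ_eq_add_one]
      rw [hdrop]
      congr 1
      omega

lemma pvB_eq_ref (works : List Int) :
    make_work_matrix_from_works_alt works = pvRef 0 works := by
  unfold make_work_matrix_from_works_alt
  by_cases h : works = []
  · subst h; simp [PySem.List.pyRange, pvRef]
  · have hL : 1 ≤ works.length := by cases works with | nil => exact absurd rfl h | cons _ _ => simp
    rw [PySem.List.pyRange_of_pos 0 (works.length : Int) (by norm_num)]
    have hlt : (0 : Int) < (works.length : Int) := by exact_mod_cast hL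
    rw [if_pos hlt]
    have hm : (((works.length : Int) - 0 + 4 - 1) / 4).toNat = (works.length + 3) / 4 := by
      omega
    rw [hm]
    rw [List.foldl_map, PySem.List.foldl_append_singleton_eq_map]
    rw [← pvB_map_eq_ref works 0]
    simp only [List.nil_append]
    apply List.map_congr_left
    intro j _
    have hstart : (0 : Int) + 4 * (j : Int) = ((4 * j : Nat) : Int) := by push_cast; ring
    rw [hstart, pv_div_cast (4 * j)]
    have h4 : 4 * j / 4 = j := by omega
    rw [h4, pv_mod2_cast j]
    have hslice : PySem.List.slice works (some ((4 * j : Nat) : Int)) (some (((4 * j : Nat) : Int) + 4)) = (works.drop (4 * j)).take 4 := by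
      have : ((4 * j : Nat) : Int) + 4 = ((4 * j : Nat) : Int) + ((4 : Nat) : Int) := by norm_num
      rw [this, PySem.List.slice_natCast_add]
    rw [hslice]
    unfold pvProc
    rcases Nat.mod_two_eq_zero_or_one j with hj | hj <;> simp [hj]

-- ===== VERDICT (by name: the statement is the Claim_ definition above) =====
theorem make_work_matrix_from_works_spec : Claim_equal_make_work_matrix_from_works := by
  intro works _
  unfold Spec_make_work_matrix_from_works
  rw [pvA_eq_ref, pvB_eq_ref]
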